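-- pv_equiv track=rewrite | github.com/Javilejoo/Lexical-Analyzer-Generator | yalex_parser.py | extraer_reglas_del_txt
-- ===== SOURCE A (Python) =====
-- def extraer_reglas_del_txt(contenido):
--     """
--     Extrae solo las líneas de la sección 'REGLAS ENCONTRADAS' desde el .txt
--     """
--     reglas = []
--     lines = contenido.splitlines()
--     guardar = False
--     for line in lines:
--         if line.strip().startswith("REGLAS ENCONTRADAS"):
--             guardar = True
--             continue
--         if line.strip().startswith("trailer:"):
--             break  # Terminamos las reglas cuando empieza el trailer
--         if guardar and line.strip() != '':
--             reglas.append(line.strip())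
--     return reglas
-- ===== SOURCE B (Python) =====
-- def extraer_reglas_del_txt(contenido):
--     """Boundary-location version: find the trailer boundary and the header line,
--     then filter-strip the slice between them."""
--     lines = contenido.splitlines()
--     t = len(lines)
--     for i, l in enumerate(lines):
--         if l.strip().startswith("trailer:"):
--             t = i
--             break
--     r = None
--     for i in range(t):
--         if lines[i].strip().startswith("REGLAS ENCONTRADAS"):
--             r = i
--             break
--     if r is None:
--         return []
--     return [l.strip() for l in lines[r + 1:t]
--             if l.strip() != '' and not l.strip().startswith("REGLAS ENCONTRADAS")]
-- ===== Notes on version B (the rewrite author's own statement) =====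
-- stated objective: alternative
-- what changed: Replaces the single flag-driven scan with explicit boundary location (index of the first 'trailer:' line, then index of the first 'REGLAS ENCONTRADAS' line before it) followed by a filtered strip of the slice between the two boundaries.
import Mathlib
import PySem

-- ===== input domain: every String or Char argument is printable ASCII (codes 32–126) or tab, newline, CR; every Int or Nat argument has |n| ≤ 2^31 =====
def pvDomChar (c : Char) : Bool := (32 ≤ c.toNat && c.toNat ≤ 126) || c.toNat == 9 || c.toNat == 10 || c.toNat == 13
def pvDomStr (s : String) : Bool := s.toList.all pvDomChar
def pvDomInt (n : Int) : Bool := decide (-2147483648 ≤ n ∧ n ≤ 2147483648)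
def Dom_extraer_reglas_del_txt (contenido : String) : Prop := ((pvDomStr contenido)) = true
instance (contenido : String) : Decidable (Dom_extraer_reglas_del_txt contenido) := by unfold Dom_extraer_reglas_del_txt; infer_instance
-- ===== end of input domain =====

-- B locates the 'trailer:' and 'REGLAS ENCONTRADAS' boundaries first and then filter-strips
-- the slice between them, instead of A's single flag-driven scan (alternative decomposition).

-- line.strip().startswith("REGLAS ENCONTRADAS")  /  line.strip().startswith("trailer:")
def pvHdr (l : String) : Bool := PySem.Str.startswith (PySem.Str.strip l) "REGLAS ENCONTRADAS"
def pvTrl (l : String) : Bool := PySem.Str.startswith (PySem.Str.strip l) "trailer:"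

-- ===== PORT A =====
-- A's for-loop with the `break`, carrying the `reglas` accumulator and the `guardar` flag
def pvLoopA : List String → List String → Bool → List String
  | [], reglas, _ => reglas
  | line :: rest, reglas, guardar =>
    if pvHdr line then pvLoopA rest reglas true
    else if pvTrl line then reglas
    else if guardar && (PySem.Str.strip line != "") then
      pvLoopA rest (reglas ++ [PySem.Str.strip line]) guardar
    else pvLoopA rest reglas guardar

def extraer_reglas_del_txt (contenido : String) : List String :=
  pvLoopA (PySem.Str.splitlines contenido) [] false

-- ===== PORT B =====
-- B's body on the split lines: t = first 'trailer:' index (len if none), r = first header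
-- index before t (the two search loops become the obvious findIdx/findIdx? recursions),
-- then the filtered, stripped slice lines[r+1:t]
def pvCoreB (lines : List String) : List String :=
  match (lines.take (lines.findIdx pvTrl)).findIdx? pvHdr with
  | none => []
  | some r =>
    ((PySem.List.slice lines (some ((r + 1 : Nat) : Int))
        (some ((lines.findIdx pvTrl : Nat) : Int))).filter
      (fun l => (PySem.Str.strip l != "") && !(pvHdr l))).map PySem.Str.strip

def extraer_reglas_del_txt_alt (contenido : String) : List String :=
  pvCoreB (PySem.Str.splitlines contenido)

-- ===== PRECONDITION & SPEC =====
def Spec_extraer_reglas_del_txt (contenido : String) (out : List String) : Prop := out = extraer_reglas_del_txt_alt contenido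
instance (contenido : String) (out : List String) : Decidable (Spec_extraer_reglas_del_txt contenido out) := by unfold Spec_extraer_reglas_del_txt; infer_instance

-- ===== CLAIM (what is proved, stated in full; the proofs are below) =====
def Claim_equal_extraer_reglas_del_txt : Prop := ∀ (contenido : String), Dom_extraer_reglas_del_txt contenido → Spec_extraer_reglas_del_txt contenido (extraer_reglas_del_txt contenido)

-- ===== LEMMAS AND PROOFS =====

-- a line cannot start with both "REGLAS ENCONTRADAS" and "trailer:"
theorem pvHdr_not_trl (l : String) (h : pvHdr l = true) : pvTrl l = false := by
  by_contra hne
  have h2 : pvTrl l = true := by revert hne; cases pvTrl l <;> simp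
  unfold pvHdr at h
  unfold pvTrl at h2
  rw [PySem.Str.startswith_eq, PySem.Chars.startswith_iff] at h h2
  obtain ⟨t1, h1⟩ := h
  obtain ⟨t2, h2'⟩ := h2
  rw [← h2'] at h1
  simp at h1

-- the accumulator lemma for A's loop
theorem pvLoopA_acc (lines : List String) (acc : List String) (g : Bool) :
    pvLoopA lines acc g = acc ++ pvLoopA lines [] g := by
  induction lines generalizing acc g with
  | nil => simp [pvLoopA]
  | cons l rest ih =>
    simp only [pvLoopA, List.nil_append]
    split_ifs with h1 h2 h3
    · rw [ih acc, ih []]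
    · simp
    · rw [ih (acc ++ [PySem.Str.strip l]), ih [PySem.Str.strip l]]
      simp
    · rw [ih acc]

-- xs.take (xs.findIdx p) is xs.takeWhile (!p ·)
theorem pvTake_findIdx {α : Type} (p : α → Bool) (xs : List α) :
    xs.take (xs.findIdx p) = xs.takeWhile (fun x => !p x) := by
  induction xs with
  | nil => simp
  | cons x rest ih =>
    by_cases h : p x
    · simp [List.findIdx_cons, h]
    · simp [List.findIdx_cons, h, ih]

-- A's loop with guardar already true collects the filtered strips up to the first trailer
theorem pvLoopA_true (lines : List String) :
    pvLoopA lines [] true =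
      ((lines.takeWhile (fun l => !pvTrl l)).filter
        (fun l => (PySem.Str.strip l != "") && !(pvHdr l))).map PySem.Str.strip := by
  induction lines with
  | nil => simp [pvLoopA]
  | cons l rest ih =>
    simp only [pvLoopA, Bool.true_and, List.takeWhile_cons, List.nil_append]
    by_cases h1 : pvHdr l
    · have h2 := pvHdr_not_trl l h1
      simp [h1, h2, ih]
    · by_cases h2 : pvTrl l
      · simp [h1, h2]
      · by_cases h3 : (PySem.Str.strip l != "") = true
        · rw [if_neg (by simp [h1]), if_neg (by simp [h2]), if_pos h3, pvLoopA_acc]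
          simp [h1, h2, h3, ih]
        · rw [if_neg (by simp [h1]), if_neg (by simp [h2]), if_neg h3]
          simp [h1, h2, h3, ih]

-- the main lemma: A's loop from guardar = false equals B's body, on any list of lines
theorem pvLoopA_eq_coreB (lines : List String) :
    pvLoopA lines [] false = pvCoreB lines := by
  induction lines with
  | nil => simp [pvLoopA, pvCoreB]
  | cons l rest ih =>
    by_cases h1 : pvHdr l
    · have h2 := pvHdr_not_trl l h1
      simp only [pvLoopA, h1, if_true]
      unfold pvCoreB
      simp only [List.findIdx_cons, h2, cond_false, List.take_succ_cons,
        List.findIdx?_cons, h1, if_true]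
      rw [PySem.List.slice_natCast]
      simp only [List.drop_succ_cons, List.drop_zero,
        Nat.zero_add, Nat.add_sub_cancel]
      rw [pvLoopA_true, pvTake_findIdx]
    · by_cases h2 : pvTrl l
      · simp [pvLoopA, h1, h2, pvCoreB, List.findIdx_cons]
      · simp only [pvLoopA, Bool.false_and]
        rw [if_neg h1, if_neg h2, if_neg (by simp), ih]
        unfold pvCoreB
        have h2' : pvTrl l = false := by revert h2; cases pvTrl l <;> simp
        have h1' : pvHdr l = false := by revert h1; cases pvHdr l <;> simp
        simp only [List.findIdx_cons, h2', cond_false, List.take_succ_cons,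
          List.findIdx?_cons, h1', Bool.false_eq_true, if_false]
        cases hfi : (rest.take (rest.findIdx pvTrl)).findIdx? pvHdr with
        | none => simp
        | some r =>
          simp only [Option.map_some]
          rw [PySem.List.slice_natCast, PySem.List.slice_natCast]
          simp only [List.drop_succ_cons]
          have : List.findIdx pvTrl rest + 1 - (r + 1 + 1) = List.findIdx pvTrl rest - (r + 1) := by
            omega
          rw [this]

-- ===== VERDICT (by name: the statement is the Claim_ definition above) =====
theorem extraer_reglas_del_txt_spec : Claim_equal_extraer_reglas_del_txt := by
  intro contenido _
  unfold Spec_extraer_reglas_del_txt extraer_reglas_del_txt extraer_reglas_del_txt_alt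
  exact pvLoopA_eq_coreB _
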